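-- pv_equiv track=rewrite | github.com/jianhu-chen/Online-Judge | leetcode/problemset/2409.count_days_spent_together.py | countDaysTogether
-- ===== SOURCE A (Python) =====
-- def countDaysTogether(arriveAlice: str, leaveAlice: str, arriveBob: str, leaveBob: str) -> int:
--     days = (31, 28, 31, 30, 31, 30, 31, 31, 30, 31, 30, 31)
--     start, end = max(arriveAlice, arriveBob), min(leaveAlice, leaveBob)
--     if end < start:
--         return 0
--     (m1, d1), (m2, d2) = map(int, start.split("-")), map(int, end.split("-"))
--     cnt = sum(days[m] for m in range(m1 - 1, m2))
--     if m1 == m2: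
--         return d2 - d1 + 1
--     cnt -= d1 - 1
--     cnt -= days[m2 - 1] - d2
--     return cnt
-- ===== SOURCE B (Python) =====
-- def countDaysTogether(arriveAlice: str, leaveAlice: str, arriveBob: str, leaveBob: str) -> int:
--     prefix = (0, 31, 59, 90, 120, 151, 181, 212, 243, 273, 304, 334, 365)
--     start, end = max(arriveAlice, arriveBob), min(leaveAlice, leaveBob)
--     if end < start:
--         return 0
--
--     def doy(s):
--         # day-of-year straight from the "MM-DD" digits, no split/int
--         return prefix[(ord(s[0]) - 48) * 10 + ord(s[1]) - 48 - 1] \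
--             + (ord(s[3]) - 48) * 10 + ord(s[4]) - 48
--
--     return doy(end) - doy(start) + 1
-- ===== Notes on version B (the rewrite author's own statement) =====
-- stated objective: simpler
-- what changed: Replaces A's split/int parsing, per-month summation loop and its two post-parse branches by a single day-of-year helper that reads the four digits directly with ord() and a cumulative prefix table, returning doy(end)-doy(start)+1; the string max/min and the disjoint-interval early 0 are kept.
-- outside the precondition, e.g. on countDaysTogether('1-01', '12-31', '1-05', '12-30'): A returns 360, B raises IndexError
import Mathlib
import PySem

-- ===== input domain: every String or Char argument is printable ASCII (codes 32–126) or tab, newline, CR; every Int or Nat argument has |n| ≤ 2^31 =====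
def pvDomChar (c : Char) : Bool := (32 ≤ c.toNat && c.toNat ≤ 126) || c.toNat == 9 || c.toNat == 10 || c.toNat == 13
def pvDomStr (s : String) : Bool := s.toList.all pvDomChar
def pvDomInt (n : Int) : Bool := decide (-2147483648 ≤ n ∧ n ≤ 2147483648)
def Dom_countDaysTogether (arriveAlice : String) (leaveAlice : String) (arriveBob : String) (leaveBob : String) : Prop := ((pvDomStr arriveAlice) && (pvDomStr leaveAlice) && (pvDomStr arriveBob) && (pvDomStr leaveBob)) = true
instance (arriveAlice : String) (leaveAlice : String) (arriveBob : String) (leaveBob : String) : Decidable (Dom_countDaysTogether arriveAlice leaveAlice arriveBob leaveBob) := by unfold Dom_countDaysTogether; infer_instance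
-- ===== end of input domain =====

-- B replaces A's split/int parsing, per-month summation loop and its post-parse branches by one
-- day-of-year helper reading the four "MM-DD" digits directly, returning doy(end)-doy(start)+1.

-- ===== PORT A =====
-- the tuple `days` of A
def pyDays : List Int := [31, 28, 31, 30, 31, 30, 31, 31, 30, 31, 30, 31]

-- the part of A after `start, end = max(...), min(...)` (Python string `<`/`max`/`min` is
-- code-point lexicographic = Lean `<` on .toList, per PySem)
def countA_go (start : String) (fin : String) : Int :=
  if fin.toList < start.toList then 0
  else
    match PySem.Str.split? start "-", PySem.Str.split? fin "-" with
    | some [a1, a2], some [b1, b2] =>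
      match PySem.Int.ofStr? a1, PySem.Int.ofStr? a2, PySem.Int.ofStr? b1, PySem.Int.ofStr? b2 with
      | some m1, some d1, some m2, some d2 =>
        -- cnt = sum(days[m] for m in range(m1 - 1, m2)); days[m] total via pyGetD: in range under Pre_
        let cnt := (PySem.List.pyRange (m1 - 1) m2 1).foldl
          (fun acc m => acc + PySem.List.pyGetD pyDays m 0) 0
        if m1 = m2 then d2 - d1 + 1
        else cnt - (d1 - 1) - (PySem.List.pyGetD pyDays (m2 - 1) 0 - d2)
      | _, _, _, _ => 0  -- unreachable under Pre_ (ValueError in Python)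
    | _, _ => 0  -- unreachable under Pre_ (ValueError in Python)

def countDaysTogether (arriveAlice : String) (leaveAlice : String) (arriveBob : String) (leaveBob : String) : Int :=
  countA_go (if arriveAlice.toList < arriveBob.toList then arriveBob else arriveAlice)
            (if leaveBob.toList < leaveAlice.toList then leaveBob else leaveAlice)

-- ===== PORT B =====
-- the tuple `prefix` of B: cumulative days before each month
def pyPrefix : List Int := [0, 31, 59, 90, 120, 151, 181, 212, 243, 273, 304, 334, 365]

-- B's helper doy(s): digits read straight off the string with ord(); under Pre_ the four
-- characters exist and the prefix index is in range (otherwise Python raises IndexError there)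
def doyB (s : String) : Int :=
  match PySem.Str.pyGet? s 0, PySem.Str.pyGet? s 1, PySem.Str.pyGet? s 3, PySem.Str.pyGet? s 4 with
  | some c0, some c1, some c3, some c4 =>
      PySem.List.pyGetD pyPrefix (((c0.toNat : Int) - 48) * 10 + (c1.toNat : Int) - 48 - 1) 0
        + ((c3.toNat : Int) - 48) * 10 + (c4.toNat : Int) - 48
  | _, _, _, _ => 0  -- unreachable under Pre_ (IndexError in Python)

-- the part of B after `start = max(...)`, `end = min(...)`
def countB_go (start : String) (fin : String) : Int :=
  if fin.toList < start.toList then 0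
  else doyB fin - doyB start + 1

def countDaysTogether_alt (arriveAlice : String) (leaveAlice : String) (arriveBob : String) (leaveBob : String) : Int :=
  countB_go (if arriveAlice.toList < arriveBob.toList then arriveBob else arriveAlice)
            (if leaveBob.toList < leaveAlice.toList then leaveBob else leaveAlice)

-- ===== PRECONDITION & SPEC =====
def monthLen (m : Nat) : Nat := [31, 28, 31, 30, 31, 30, 31, 31, 30, 31, 30, 31].getD (m - 1) 0
def pad2 (n : Nat) : List Char := [Char.ofNat (48 + n / 10), Char.ofNat (48 + n % 10)]
def dateStr (m d : Nat) : String := String.ofList (pad2 m ++ '-' :: pad2 d)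
def isValidDate (s : String) : Bool :=
  (List.range 12).any fun i => (List.range (monthLen (i + 1))).any fun j => s = dateStr (i + 1) (j + 1)

-- Pre_ admits the inputs on which A's value is the specified one: either the two stay intervals are
-- already disjoint in string order (min of the leaves < max of the arrivals, where both programs
-- answer 0 before parsing anything), or all four strings are zero-padded valid "MM-DD" dates (the
-- problem's stated format).  Outside this, A raises (ValueError/IndexError) on non-"<int>-<int>"
-- strings or months outside 1..12, and on non-zero-padded date strings A's value is an artefact of
-- comparing date strings lexicographically ("9-05" > "10-10"), meaningful only on the padded format
-- (B raises IndexError there).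
def Pre_countDaysTogether (arriveAlice : String) (leaveAlice : String) (arriveBob : String) (leaveBob : String) : Prop :=
  ((if leaveBob.toList < leaveAlice.toList then leaveBob else leaveAlice).toList <
    (if arriveAlice.toList < arriveBob.toList then arriveBob else arriveAlice).toList) ∨
  (isValidDate arriveAlice = true ∧ isValidDate leaveAlice = true ∧
   isValidDate arriveBob = true ∧ isValidDate leaveBob = true)
instance (arriveAlice : String) (leaveAlice : String) (arriveBob : String) (leaveBob : String) : Decidable (Pre_countDaysTogether arriveAlice leaveAlice arriveBob leaveBob) := by unfold Pre_countDaysTogether; infer_instance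

def pvWitness_countDaysTogether : String × String × String × String := ("08-15", "08-18", "08-16", "08-19")

def Spec_countDaysTogether (arriveAlice : String) (leaveAlice : String) (arriveBob : String) (leaveBob : String) (out : Int) : Prop := out = countDaysTogether_alt arriveAlice leaveAlice arriveBob leaveBob
instance (arriveAlice : String) (leaveAlice : String) (arriveBob : String) (leaveBob : String) (out : Int) : Decidable (Spec_countDaysTogether arriveAlice leaveAlice arriveBob leaveBob out) := by unfold Spec_countDaysTogether; infer_instance

-- ===== CLAIM (what is proved, stated in full; the proofs are below) =====
def Claim_equal_countDaysTogether : Prop := ∀ (arriveAlice : String) (leaveAlice : String) (arriveBob : String) (leaveBob : String), Dom_countDaysTogether arriveAlice leaveAlice arriveBob leaveBob → Pre_countDaysTogether arriveAlice leaveAlice arriveBob leaveBob → Spec_countDaysTogether arriveAlice leaveAlice arriveBob leaveBob (countDaysTogether arriveAlice leaveAlice arriveBob leaveBob)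

-- ===== LEMMAS AND PROOFS =====

-- cumulative days before month i (proof-side table)
def pfx (i : Nat) : Int := ([0, 31, 59, 90, 120, 151, 181, 212, 243, 273, 304, 334, 365] : List Int).getD i 0

theorem char_cons_lt_iff (a b : Char) (l1 l2 : List Char) :
    (a :: l1 < b :: l2) ↔ (a < b ∨ (a = b ∧ l1 < l2)) := by
  show List.lt _ _ ↔ _
  rw [List.lt_iff_lex_lt]
  constructor
  · intro h
    cases h with
    | rel h => exact Or.inl h
    | cons h => exact Or.inr ⟨rfl, (List.lt_iff_lex_lt _ _).mpr h⟩
  · rintro (h | ⟨rfl, h⟩)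
    · exact List.Lex.rel h
    · exact List.Lex.cons ((List.lt_iff_lex_lt _ _).mp h)

theorem nil_not_lt_nil : ¬ (([] : List Char) < []) := by
  intro h
  exact (by cases (List.lt_iff_lex_lt ([] : List Char) []).mp h)

set_option maxHeartbeats 8000000 in
theorem pad2_table : ∀ a ∈ Finset.Icc (1:ℕ) 31, ∀ b ∈ Finset.Icc (1:ℕ) 31,
    ((pad2 a < pad2 b) ↔ a < b) ∧ ((pad2 a = pad2 b) ↔ a = b) := by decide

theorem pad2_lt_iff {a b : Nat} (ha : 1 ≤ a) (ha' : a ≤ 31) (hb : 1 ≤ b) (hb' : b ≤ 31) :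
    ((pad2 a < pad2 b) ↔ a < b) ∧ ((pad2 a = pad2 b) ↔ a = b) :=
  pad2_table a (Finset.mem_Icc.mpr ⟨ha, ha'⟩) b (Finset.mem_Icc.mpr ⟨hb, hb'⟩)

theorem append2_lt_iff (a b c d : Char) (r s : List Char) :
    ([a, b] ++ '-' :: r < [c, d] ++ '-' :: s) ↔
      ([a, b] < [c, d] ∨ ([a, b] = [c, d] ∧ r < s)) := by
  simp only [List.cons_append, List.nil_append, char_cons_lt_iff, List.cons.injEq,
    lt_irrefl '-', false_or, true_and, and_true, nil_not_lt_nil, and_false, or_false]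
  tauto

theorem dateLt_iff {m1 d1 m2 d2 : Nat}
    (hm1 : 1 ≤ m1) (hm1' : m1 ≤ 31) (hd1 : 1 ≤ d1) (hd1' : d1 ≤ 31)
    (hm2 : 1 ≤ m2) (hm2' : m2 ≤ 31) (hd2 : 1 ≤ d2) (hd2' : d2 ≤ 31) :
    (pad2 m1 ++ '-' :: pad2 d1 < pad2 m2 ++ '-' :: pad2 d2) ↔
      (m1 < m2 ∨ (m1 = m2 ∧ d1 < d2)) := by
  rw [show pad2 m1 = [Char.ofNat (48 + m1 / 10), Char.ofNat (48 + m1 % 10)] from rfl,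
    show pad2 m2 = [Char.ofNat (48 + m2 / 10), Char.ofNat (48 + m2 % 10)] from rfl,
    append2_lt_iff]
  rw [show [Char.ofNat (48 + m1 / 10), Char.ofNat (48 + m1 % 10)] = pad2 m1 from rfl,
    show [Char.ofNat (48 + m2 / 10), Char.ofNat (48 + m2 % 10)] = pad2 m2 from rfl]
  rw [(pad2_lt_iff hm1 hm1' hm2 hm2').1, (pad2_lt_iff hm1 hm1' hm2 hm2').2,
    (pad2_lt_iff hd1 hd1' hd2 hd2').1]

theorem toList_dateStr (m d : Nat) : (dateStr m d).toList = pad2 m ++ '-' :: pad2 d := by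
  simp [dateStr]

set_option maxHeartbeats 8000000 in
theorem parse_table : ∀ m ∈ Finset.Icc (1:ℕ) 12, ∀ d ∈ Finset.Icc (1:ℕ) 31,
    PySem.Str.split? (dateStr m d) "-" = some [String.ofList (pad2 m), String.ofList (pad2 d)] ∧
    PySem.Int.ofStr? (String.ofList (pad2 m)) = some (m : Int) ∧
    PySem.Int.ofStr? (String.ofList (pad2 d)) = some (d : Int) := by decide

theorem parse_dateStr {m d : Nat} (hm : 1 ≤ m) (hm' : m ≤ 12) (hd : 1 ≤ d) (hd' : d ≤ 31) :
    PySem.Str.split? (dateStr m d) "-" = some [String.ofList (pad2 m), String.ofList (pad2 d)] ∧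
    PySem.Int.ofStr? (String.ofList (pad2 m)) = some (m : Int) ∧
    PySem.Int.ofStr? (String.ofList (pad2 d)) = some (d : Int) :=
  parse_table m (Finset.mem_Icc.mpr ⟨hm, hm'⟩) d (Finset.mem_Icc.mpr ⟨hd, hd'⟩)

set_option maxHeartbeats 8000000 in
theorem sumA_table : ∀ m2 ∈ Finset.Icc (1:ℕ) 12, ∀ m1 ∈ Finset.Icc (1:ℕ) m2,
    (PySem.List.pyRange ((m1 : Int) - 1) (m2 : Int) 1).foldl
      (fun acc m => acc + PySem.List.pyGetD pyDays m 0) 0 = pfx m2 - pfx (m1 - 1) := by decide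

theorem sumA_eq {m1 m2 : Nat} (h1 : 1 ≤ m1) (h2' : m2 ≤ 12) (h12 : m1 ≤ m2) :
    (PySem.List.pyRange ((m1 : Int) - 1) (m2 : Int) 1).foldl
      (fun acc m => acc + PySem.List.pyGetD pyDays m 0) 0 = pfx m2 - pfx (m1 - 1) :=
  sumA_table m2 (Finset.mem_Icc.mpr ⟨by omega, h2'⟩) m1 (Finset.mem_Icc.mpr ⟨h1, h12⟩)

set_option maxHeartbeats 8000000 in
theorem daysAt_table : ∀ m ∈ Finset.Icc (1:ℕ) 12,
    PySem.List.pyGetD pyDays ((m : Int) - 1) 0 = pfx m - pfx (m - 1) ∧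
    (monthLen m : Int) = pfx m - pfx (m - 1) := by decide

theorem daysAt_eq {m : Nat} (h : 1 ≤ m) (h' : m ≤ 12) :
    PySem.List.pyGetD pyDays ((m : Int) - 1) 0 = pfx m - pfx (m - 1) ∧
    (monthLen m : Int) = pfx m - pfx (m - 1) :=
  daysAt_table m (Finset.mem_Icc.mpr ⟨h, h'⟩)

set_option maxHeartbeats 8000000 in
theorem doy_table : ∀ m ∈ Finset.Icc (1:ℕ) 12, ∀ d ∈ Finset.Icc (1:ℕ) 31,
    doyB (dateStr m d) = pfx (m - 1) + d := by decide

theorem doy_eq {m d : Nat} (hm : 1 ≤ m) (hm' : m ≤ 12) (hd : 1 ≤ d) (hd' : d ≤ 31) :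
    doyB (dateStr m d) = pfx (m - 1) + d :=
  doy_table m (Finset.mem_Icc.mpr ⟨hm, hm'⟩) d (Finset.mem_Icc.mpr ⟨hd, hd'⟩)

theorem monthLen_le_31 {m : Nat} (h : 1 ≤ m) (h' : m ≤ 12) : monthLen m ≤ 31 :=
  (by decide : ∀ m ∈ Finset.Icc (1:ℕ) 12, monthLen m ≤ 31) m (Finset.mem_Icc.mpr ⟨h, h'⟩)

-- the two sides agree once start and end are canonical dates
theorem go_eq {m1 d1 m2 d2 : Nat}
    (hm1 : 1 ≤ m1) (hm1' : m1 ≤ 12) (hd1 : 1 ≤ d1) (hd1' : d1 ≤ monthLen m1)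
    (hm2 : 1 ≤ m2) (hm2' : m2 ≤ 12) (hd2 : 1 ≤ d2) (hd2' : d2 ≤ monthLen m2) :
    countA_go (dateStr m1 d1) (dateStr m2 d2) = countB_go (dateStr m1 d1) (dateStr m2 d2) := by
  have hd1'' : d1 ≤ 31 := le_trans hd1' (monthLen_le_31 hm1 hm1')
  have hd2'' : d2 ≤ 31 := le_trans hd2' (monthLen_le_31 hm2 hm2')
  have hp1 := parse_dateStr hm1 hm1' hd1 hd1''
  have hp2 := parse_dateStr hm2 hm2' hd2 hd2''
  simp only [countA_go, countB_go, toList_dateStr, hp1.1, hp2.1,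
    hp1.2.1, hp1.2.2, hp2.2.1, hp2.2.2,
    doy_eq hm1 hm1' hd1 hd1'', doy_eq hm2 hm2' hd2 hd2'']
  simp only [show (pad2 m2 ++ '-' :: pad2 d2 < pad2 m1 ++ '-' :: pad2 d1) ↔
        (m2 < m1 ∨ (m2 = m1 ∧ d2 < d1)) from
      dateLt_iff hm2 (by omega) hd2 hd2'' hm1 (by omega) hd1 hd1'',
    (daysAt_eq hm2 hm2').1]
  split_ifs with hlt heq
  · -- disjoint (end < start): both return 0
    rfl
  · -- same month: the prefix terms cancel
    have : m1 = m2 := by exact_mod_cast heq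
    subst this
    omega
  · -- different months with start ≤ end, hence m1 < m2: the telescoped sum agrees
    have hne : m1 ≠ m2 := fun h => heq (by exact_mod_cast h)
    have hlt' : m1 < m2 := by omega
    rw [sumA_eq hm1 hm2' (by omega)]
    omega

theorem isValidDate_elim {s : String} (h : isValidDate s = true) :
    ∃ m d : Nat, 1 ≤ m ∧ m ≤ 12 ∧ 1 ≤ d ∧ d ≤ monthLen m ∧ s = dateStr m d := by
  unfold isValidDate at h
  rw [List.any_eq_true] at h
  obtain ⟨i, hi, h⟩ := h
  rw [List.any_eq_true] at h
  obtain ⟨j, hj, h⟩ := h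
  rw [List.mem_range] at hi hj
  exact ⟨i + 1, j + 1, by omega, by omega, by omega, by omega, by simpa using h⟩

-- ===== VERDICT (by name: the statement is the Claim_ definition above) =====
theorem countDaysTogether_spec : Claim_equal_countDaysTogether := by
  intro aa la ab lb _ hpre
  unfold Spec_countDaysTogether countDaysTogether countDaysTogether_alt
  rcases hpre with hguard | ⟨ha, hl, hb, hlb⟩
  · -- disjoint intervals in string order: both ports answer 0 at their first guard
    unfold countA_go countB_go
    rw [if_pos hguard, if_pos hguard]
  · obtain ⟨ma, da, h1, h2, h3, h4, rfl⟩ := isValidDate_elim ha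
    obtain ⟨ml, dl, g1, g2, g3, g4, rfl⟩ := isValidDate_elim hl
    obtain ⟨mb, db, k1, k2, k3, k4, rfl⟩ := isValidDate_elim hb
    obtain ⟨mc, dc, n1, n2, n3, n4, rfl⟩ := isValidDate_elim hlb
    split_ifs <;>
      first
        | exact go_eq k1 k2 k3 k4 n1 n2 n3 n4
        | exact go_eq k1 k2 k3 k4 g1 g2 g3 g4
        | exact go_eq h1 h2 h3 h4 n1 n2 n3 n4
        | exact go_eq h1 h2 h3 h4 g1 g2 g3 g4
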